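-- pv_equiv track=rewrite | github.com/stud-many/MonthlyResolution_2_0 | main_functions.py | find_transaction
-- ===== SOURCE A (Python) =====
-- def find_transaction(working_stats):
--     biggest_positive = 0 #gehörts diesem?
--     biggest_positive_owner = 0
--     biggest_negative = 0 #schuldet dieser?
--     biggest_negative_owner = 0
--
--     for item in working_stats:
--         if item[3] > biggest_positive:
--             biggest_positive_owner = item[0]
--             biggest_positive = item[3]
--         elif item[3] < biggest_negative:
--             biggest_negative_owner = item[0]
--             biggest_negative = item[3]
--     trans = 0
--     if biggest_positive >= abs(biggest_negative) :
--         trans = abs(biggest_negative)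
--     elif abs(biggest_negative) > biggest_positive:
--             trans = biggest_positive
--     return [biggest_positive_owner,biggest_negative_owner,trans]
-- ===== SOURCE B (Python) =====
-- def find_transaction(working_stats):
--     pos = max((it for it in working_stats if it[3] > 0),
--               key=lambda it: it[3], default=None)
--     neg = min((it for it in working_stats if it[3] < 0),
--               key=lambda it: it[3], default=None)
--     bp_owner, bp = (pos[0], pos[3]) if pos is not None else (0, 0)
--     bn_owner, bn = (neg[0], neg[3]) if neg is not None else (0, 0)
--     return [bp_owner, bn_owner, min(bp, -bn)]
-- ===== Notes on version B (the rewrite author's own statement) =====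
-- stated objective: idiomatic
-- what changed: Replaces the single interleaved mutable-state loop by two builtin reductions (max over strictly positive balances, min over strictly negative ones, first extremal kept) and computes the transfer as min(bp, -bn) instead of the abs/if-elif chain.
import Mathlib
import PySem

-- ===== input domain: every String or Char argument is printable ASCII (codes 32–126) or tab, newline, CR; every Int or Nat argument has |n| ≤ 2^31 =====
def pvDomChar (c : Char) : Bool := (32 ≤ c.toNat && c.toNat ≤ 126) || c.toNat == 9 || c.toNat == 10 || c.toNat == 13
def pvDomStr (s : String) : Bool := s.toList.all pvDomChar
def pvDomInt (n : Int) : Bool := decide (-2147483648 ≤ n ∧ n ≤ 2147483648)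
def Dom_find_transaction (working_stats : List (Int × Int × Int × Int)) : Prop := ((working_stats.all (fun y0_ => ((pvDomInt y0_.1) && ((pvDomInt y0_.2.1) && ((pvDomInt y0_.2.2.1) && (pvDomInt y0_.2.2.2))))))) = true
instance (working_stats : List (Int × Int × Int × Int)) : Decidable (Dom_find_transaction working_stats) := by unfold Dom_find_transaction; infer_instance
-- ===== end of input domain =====

-- B replaces A's single interleaved running-max/min loop by two independent
-- max/min reductions over the sign-filtered list and a direct min for the
-- transfer amount (idiomatic; same O(n) cost).

-- ===== PORT A =====
-- A's loop body: item[3] > biggest_positive / elif item[3] < biggest_negative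
def pvStepA (s : Int × Int × Int × Int) (item : Int × Int × Int × Int) :
    Int × Int × Int × Int :=
  if item.2.2.2 > s.1 then (item.2.2.2, item.1, s.2.2.1, s.2.2.2)
  else if item.2.2.2 < s.2.2.1 then (s.1, s.2.1, item.2.2.2, item.1)
  else s

def find_transaction (working_stats : List (Int × Int × Int × Int)) : List Int :=
  let st := working_stats.foldl pvStepA (0, 0, 0, 0)
  let biggest_positive := st.1
  let biggest_positive_owner := st.2.1
  let biggest_negative := st.2.2.1
  let biggest_negative_owner := st.2.2.2
  let trans :=
    if biggest_positive ≥ |biggest_negative| then |biggest_negative|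
    else if |biggest_negative| > biggest_positive then biggest_positive
    else 0
  [biggest_positive_owner, biggest_negative_owner, trans]

-- ===== PORT B =====
def find_transaction_alt (working_stats : List (Int × Int × Int × Int)) : List Int :=
  let pos := PySem.List.max? (working_stats.filter (fun it => it.2.2.2 > 0))
      (fun it => it.2.2.2)
  let neg := PySem.List.min? (working_stats.filter (fun it => it.2.2.2 < 0))
      (fun it => it.2.2.2)
  let bp_owner := match pos with | some m => m.1 | none => 0
  let bp := match pos with | some m => m.2.2.2 | none => 0
  let bn_owner := match neg with | some m => m.1 | none => 0
  let bn := match neg with | some m => m.2.2.2 | none => 0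
  [bp_owner, bn_owner, min bp (-bn)]

-- ===== PRECONDITION & SPEC =====
def Spec_find_transaction (working_stats : List (Int × Int × Int × Int)) (out : List Int) : Prop := out = find_transaction_alt working_stats
instance (working_stats : List (Int × Int × Int × Int)) (out : List Int) : Decidable (Spec_find_transaction working_stats out) := by unfold Spec_find_transaction; infer_instance

-- ===== CLAIM (what is proved, stated in full; the proofs are below) =====
def Claim_equal_find_transaction : Prop := ∀ (working_stats : List (Int × Int × Int × Int)), Dom_find_transaction working_stats → Spec_find_transaction working_stats (find_transaction working_stats)

-- ===== LEMMAS AND PROOFS =====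

-- components of an optional extremal element, with A's 0 defaults
def pvVal (o : Option (Int × Int × Int × Int)) : Int :=
  match o with | some m => m.2.2.2 | none => 0
def pvOwn (o : Option (Int × Int × Int × Int)) : Int :=
  match o with | some m => m.1 | none => 0

-- B's max?/min? over the filtered list, fused into one step over the raw list
def pvStepPos (o : Option (Int × Int × Int × Int)) (x : Int × Int × Int × Int) :
    Option (Int × Int × Int × Int) :=
  if x.2.2.2 > 0 then
    (match o with
     | none => some x
     | some m => if m.2.2.2 < x.2.2.2 then some x else some m)
  else o
def pvStepNeg (o : Option (Int × Int × Int × Int)) (x : Int × Int × Int × Int) :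
    Option (Int × Int × Int × Int) :=
  if x.2.2.2 < 0 then
    (match o with
     | none => some x
     | some m => if x.2.2.2 < m.2.2.2 then some x else some m)
  else o

lemma pv_main (ws : List (Int × Int × Int × Int)) :
    ∀ (pa na : Option (Int × Int × Int × Int)),
    (∀ m, pa = some m → 0 < m.2.2.2) → (∀ m, na = some m → m.2.2.2 < 0) →
    ws.foldl pvStepA (pvVal pa, pvOwn pa, pvVal na, pvOwn na)
      = (pvVal (ws.foldl pvStepPos pa), pvOwn (ws.foldl pvStepPos pa),
         pvVal (ws.foldl pvStepNeg na), pvOwn (ws.foldl pvStepNeg na)) := by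
  induction ws with
  | nil => intro pa na _ _; rfl
  | cons x t ih =>
    intro pa na hpa hna
    have hstate :
        pvStepA (pvVal pa, pvOwn pa, pvVal na, pvOwn na) x
          = (pvVal (pvStepPos pa x), pvOwn (pvStepPos pa x),
             pvVal (pvStepNeg na x), pvOwn (pvStepNeg na x)) := by
      rcases pa with _ | m <;> rcases na with _ | k
      · simp only [pvStepA, pvStepPos, pvStepNeg, pvVal, pvOwn]
        split_ifs <;> dsimp only <;> simp only [Prod.mk.injEq] <;>
          first | trivial | (refine ⟨?_, ?_, ?_, ?_⟩ <;> omega) | omega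
      · have hk := hna k rfl
        simp only [pvStepA, pvStepPos, pvStepNeg, pvVal, pvOwn]
        split_ifs <;> dsimp only <;> simp only [Prod.mk.injEq] <;>
          first | trivial | (refine ⟨?_, ?_, ?_, ?_⟩ <;> omega) | omega
      · have hm := hpa m rfl
        simp only [pvStepA, pvStepPos, pvStepNeg, pvVal, pvOwn]
        split_ifs <;> dsimp only <;> simp only [Prod.mk.injEq] <;>
          first | trivial | (refine ⟨?_, ?_, ?_, ?_⟩ <;> omega) | omega
      · have hm := hpa m rfl
        have hk := hna k rfl
        simp only [pvStepA, pvStepPos, pvStepNeg, pvVal, pvOwn]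
        split_ifs <;> dsimp only <;> simp only [Prod.mk.injEq] <;>
          first | trivial | (refine ⟨?_, ?_, ?_, ?_⟩ <;> omega) | omega
    have hpa' : ∀ m, pvStepPos pa x = some m → 0 < m.2.2.2 := by
      intro m hm
      unfold pvStepPos at hm
      by_cases h1 : x.2.2.2 > 0
      · simp only [h1, if_pos] at hm
        rcases pa with _ | p
        · cases hm; exact h1
        · by_cases h2 : p.2.2.2 < x.2.2.2 <;> simp [h2] at hm <;>
            [skip; exact hm ▸ hpa p rfl]
          cases hm; exact h1
      · simp only [h1, if_false] at hm; exact hpa m hm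
    have hna' : ∀ m, pvStepNeg na x = some m → m.2.2.2 < 0 := by
      intro m hm
      unfold pvStepNeg at hm
      by_cases h1 : x.2.2.2 < 0
      · simp only [h1, if_pos] at hm
        rcases na with _ | p
        · cases hm; exact h1
        · by_cases h2 : x.2.2.2 < p.2.2.2 <;> simp [h2] at hm <;>
            [skip; exact hm ▸ hna p rfl]
          cases hm; exact h1
      · simp only [h1, if_false] at hm; exact hna m hm
    simpa only [List.foldl_cons, hstate] using ih (pvStepPos pa x) (pvStepNeg na x) hpa' hna'

lemma pv_max_filter (ws : List (Int × Int × Int × Int)) :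
    PySem.List.max? (ws.filter (fun it => it.2.2.2 > 0)) (fun it => it.2.2.2)
      = ws.foldl pvStepPos none := by
  unfold PySem.List.max?
  rw [List.foldl_filter]
  congr 1
  funext acc x
  unfold pvStepPos
  by_cases h : x.2.2.2 > 0 <;> rcases acc with _ | m <;> simp [h]

lemma pv_min_filter (ws : List (Int × Int × Int × Int)) :
    PySem.List.min? (ws.filter (fun it => it.2.2.2 < 0)) (fun it => it.2.2.2)
      = ws.foldl pvStepNeg none := by
  unfold PySem.List.min?
  rw [List.foldl_filter]
  congr 1
  funext acc x
  unfold pvStepNeg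
  by_cases h : x.2.2.2 < 0 <;> rcases acc with _ | m <;> simp [h]

-- ===== VERDICT (by name: the statement is the Claim_ definition above) =====
theorem find_transaction_spec : Claim_equal_find_transaction := by
  intro ws _
  unfold Spec_find_transaction find_transaction find_transaction_alt
  have hmain := pv_main ws none none (by intro m h; cases h) (by intro m h; cases h)
  simp only [pvVal, pvOwn] at hmain
  rw [pv_max_filter, pv_min_filter]
  rw [hmain]
  -- positivity/negativity of the fold results
  have hpos : ∀ m, ws.foldl pvStepPos none = some m → 0 < m.2.2.2 := by
    have : ∀ (l : List (Int × Int × Int × Int)) (o : Option (Int × Int × Int × Int)),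
        (∀ m, o = some m → 0 < m.2.2.2) → ∀ m, l.foldl pvStepPos o = some m → 0 < m.2.2.2 := by
      intro l
      induction l with
      | nil => intro o ho m hm; exact ho m hm
      | cons x t iht =>
        intro o ho m hm
        refine iht (pvStepPos o x) ?_ m hm
        intro p hp
        unfold pvStepPos at hp
        by_cases h1 : x.2.2.2 > 0
        · simp only [h1, if_pos] at hp
          rcases o with _ | q
          · cases hp; exact h1
          · by_cases h2 : q.2.2.2 < x.2.2.2 <;> simp [h2] at hp
            · cases hp; exact h1
            · exact hp ▸ ho q rfl
        · simp only [h1, if_false] at hp; exact ho p hp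
    exact this ws none (by intro m h; cases h)
  have hneg : ∀ m, ws.foldl pvStepNeg none = some m → m.2.2.2 < 0 := by
    have : ∀ (l : List (Int × Int × Int × Int)) (o : Option (Int × Int × Int × Int)),
        (∀ m, o = some m → m.2.2.2 < 0) → ∀ m, l.foldl pvStepNeg o = some m → m.2.2.2 < 0 := by
      intro l
      induction l with
      | nil => intro o ho m hm; exact ho m hm
      | cons x t iht =>
        intro o ho m hm
        refine iht (pvStepNeg o x) ?_ m hm
        intro p hp
        unfold pvStepNeg at hp
        by_cases h1 : x.2.2.2 < 0
        · simp only [h1, if_pos] at hp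
          rcases o with _ | q
          · cases hp; exact h1
          · by_cases h2 : x.2.2.2 < q.2.2.2 <;> simp [h2] at hp
            · cases hp; exact h1
            · exact hp ▸ ho q rfl
        · simp only [h1, if_false] at hp; exact ho p hp
    exact this ws none (by intro m h; cases h)
  have htrans : ∀ bp bn : Int, 0 ≤ bp → bn ≤ 0 →
      (if bp ≥ |bn| then |bn| else if |bn| > bp then bp else 0) = min bp (-bn) := by
    intro bp bn h1 h2
    rw [abs_of_nonpos h2]
    split_ifs <;> omega
  rcases hP : ws.foldl pvStepPos none with _ | mp <;>
    rcases hN : ws.foldl pvStepNeg none with _ | mn <;>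
    simp only [List.cons.injEq, and_true, true_and]
  · exact htrans 0 0 le_rfl le_rfl
  · exact htrans 0 mn.2.2.2 le_rfl (le_of_lt (hneg mn hN))
  · exact htrans mp.2.2.2 0 (le_of_lt (hpos mp hP)) le_rfl
  · exact htrans mp.2.2.2 mn.2.2.2 (le_of_lt (hpos mp hP)) (le_of_lt (hneg mn hN))
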